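-- pv_equiv track=rewrite | github.com/huynhtuandat05december/master-thesis-pipeline | post_processing/truncate_parsed_completion.py | find_largest_suffix_prefix_overlap
-- ===== SOURCE A (Python) =====
-- def find_largest_suffix_prefix_overlap(left: str, right: str) -> str:
--     overlap = ''
--
--     for i in range(1, min(len(left), len(right)) + 1):
--         suffix = left[-i:]
--         prefix = right[:i]
--
--         if suffix == prefix:
--             overlap = suffix
--
--     if len(overlap) == 0:
--         return None
--
--     return overlap
-- ===== SOURCE B (Python) =====
-- def find_largest_suffix_prefix_overlap(left: str, right: str) -> str:
--     s = left
--     while s: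
--         if right.startswith(s):
--             return s
--         s = s[1:]
--     return None
-- ===== Notes on version B (the rewrite author's own statement) =====
-- stated objective: alternative
-- what changed: B replaces A's ascending index loop (slicing both strings at every i and keeping the last match in an accumulator) by a descending walk over the suffixes of left itself (s = s[1:]) that returns the first suffix right startswith, so no accumulator, no index arithmetic and no slicing of right.
import Mathlib
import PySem

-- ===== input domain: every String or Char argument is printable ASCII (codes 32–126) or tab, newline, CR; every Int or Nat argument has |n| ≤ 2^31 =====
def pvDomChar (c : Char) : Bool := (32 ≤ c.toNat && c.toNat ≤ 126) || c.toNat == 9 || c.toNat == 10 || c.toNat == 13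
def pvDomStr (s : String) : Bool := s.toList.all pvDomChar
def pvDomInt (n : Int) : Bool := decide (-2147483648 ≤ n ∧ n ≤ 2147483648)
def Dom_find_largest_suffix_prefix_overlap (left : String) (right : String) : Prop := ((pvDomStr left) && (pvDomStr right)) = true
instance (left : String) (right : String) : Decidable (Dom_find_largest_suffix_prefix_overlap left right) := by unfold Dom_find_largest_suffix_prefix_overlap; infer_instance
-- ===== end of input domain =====

-- B replaces A's ascending index loop (slicing both strings at every i, keeping the last
-- match in an accumulator) by a descending walk over the suffixes of left itself that
-- returns the first suffix right starts with; same cost class, no accumulator (objective: alternative).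

-- ===== PORT A =====
def find_largest_suffix_prefix_overlap (left : String) (right : String) : Option String :=
  let overlap : String := ""
  let overlap := (PySem.List.pyRange 1 (min (PySem.Str.len left) (PySem.Str.len right) + 1)).foldl
    (fun overlap i =>
      let suffix := PySem.Str.slice left (some (-i)) none
      let pre := PySem.Str.slice right none (some i)
      if suffix == pre then suffix else overlap) overlap
  if PySem.Str.len overlap == 0 then none else some overlap

-- ===== PORT B =====
-- 'while s: … s = s[1:]' walks the suffixes of left, longest first
def altGo (right : List Char) : List Char → Option (List Char)
  | [] => none
  | c :: rest =>
      if PySem.Chars.startswith right (c :: rest) then some (c :: rest) else altGo right rest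

def find_largest_suffix_prefix_overlap_alt (left : String) (right : String) : Option String :=
  (altGo right.toList left.toList).map String.ofList

-- ===== PRECONDITION & SPEC =====
def Spec_find_largest_suffix_prefix_overlap (left : String) (right : String) (out : Option String) : Prop := out = find_largest_suffix_prefix_overlap_alt left right
instance (left : String) (right : String) (out : Option String) : Decidable (Spec_find_largest_suffix_prefix_overlap left right out) := by unfold Spec_find_largest_suffix_prefix_overlap; infer_instance

-- ===== CLAIM (what is proved, stated in full; the proofs are below) =====
def Claim_equal_find_largest_suffix_prefix_overlap : Prop := ∀ (left : String) (right : String), Dom_find_largest_suffix_prefix_overlap left right → Spec_find_largest_suffix_prefix_overlap left right (find_largest_suffix_prefix_overlap left right)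

-- ===== LEMMAS AND PROOFS =====

-- the largest i ∈ [1..min |L| |R|] with L.drop (|L|-i) = R.take i, found by descending scan
def pvBest (L R : List Char) : Option Nat :=
  ((List.range' 1 (min L.length R.length)).reverse).find?
    (fun i => decide (L.drop (L.length - i) = R.take i))

lemma pv_find?_congr {α : Type} {p q : α → Bool} :
    ∀ (l : List α), (∀ x ∈ l, p x = q x) → l.find? p = l.find? q := by
  intro l
  induction l with
  | nil => intro _; rfl
  | cons x xs ih =>
      intro h
      have hx := h x (by simp)
      by_cases hp : p x = true
      · simp [hp, hx ▸ hp]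
      · have hq : q x = false := by rw [← hx]; simpa using hp
        have hp' : p x = false := by simpa using hp
        simp [hp', hq]
        exact ih (fun y hy => h y (by simp [hy]))

lemma pv_foldl_last {α β : Type} (p : α → Bool) (g : α → β) :
    ∀ (l : List α) (init : β),
      l.foldl (fun ov i => if p i then g i else ov) init =
        (match l.reverse.find? p with
         | some i => g i
         | none => init) := by
  intro l
  induction l with
  | nil => intro init; rfl
  | cons x xs ih =>
      intro init
      rw [List.foldl_cons, ih, List.reverse_cons, List.find?_append]
      cases h : xs.reverse.find? p with
      | some i => simp
      | none => by_cases hp : p x <;> simp [hp, List.find?]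

lemma pv_pyRange_one : ∀ (m : Nat),
    PySem.List.pyRange 1 ((m : Int) + 1) = (List.range' 1 m).map (Nat.cast : Nat → Int)
  | 0 => by decide
  | m + 1 => by
      have h1 : (((m + 1 : Nat) : Int) + 1) = ((m : Int) + 1) + 1 := by push_cast; ring
      rw [h1, PySem.List.pyRange_one_succ_right (by omega), pv_pyRange_one m,
        List.range'_concat, List.map_append]
      simp
      omega

lemma pv_beq_string (s t : String) : (s == t) = decide (s.toList = t.toList) := by
  rw [Bool.beq_eq_decide_eq]
  exact decide_eq_decide.mpr (Iff.symm String.toList_inj)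

lemma pv_A_eq (left right : String) :
    find_largest_suffix_prefix_overlap left right =
      (pvBest left.toList right.toList).map
        (fun i => String.ofList (left.toList.drop (left.toList.length - i))) := by
  have hlen : min (PySem.Str.len left) (PySem.Str.len right)
      = ((min left.toList.length right.toList.length : Nat) : Int) := by
    simp [PySem.Str.len_eq, Nat.cast_min]
  unfold find_largest_suffix_prefix_overlap
  simp only [hlen, pv_pyRange_one]
  rw [pv_foldl_last]
  rw [← List.map_reverse, List.find?_map]
  rw [pv_find?_congr ((List.range' 1 (min left.toList.length right.toList.length)).reverse)
    (q := fun i : Nat => decide (left.toList.drop (left.toList.length - i) = right.toList.take i))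
    (by
      intro i hi
      have hi' : 1 ≤ i := by
        rw [List.mem_reverse, List.mem_range'_1] at hi
        omega
      simp [Function.comp, pv_beq_string, PySem.Str.toList_slice,
        PySem.Chars.slice_eq_listSlice, PySem.List.slice_from_neg_natCast _ _ hi',
        PySem.List.slice_to_natCast])]
  have hpb : ((List.range' 1 (min left.toList.length right.toList.length)).reverse).find?
      (fun i : Nat => decide (left.toList.drop (left.toList.length - i) = right.toList.take i))
      = pvBest left.toList right.toList := rfl
  rw [hpb]
  cases h : pvBest left.toList right.toList with
  | none =>
      simp only [Option.map_none]
      decide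
  | some i =>
      unfold pvBest at h
      have hmem := List.mem_of_find?_eq_some h
      rw [List.mem_reverse, List.mem_range'_1] at hmem
      simp only [Option.map_some]
      have hdrop : (PySem.Str.slice left (some (-(i : Int))) none).toList
          = left.toList.drop (left.toList.length - i) := by
        simp [PySem.Str.toList_slice, PySem.Chars.slice_eq_listSlice,
          PySem.List.slice_from_neg_natCast _ _ (by omega : 0 < i)]
      have hlen2 : (PySem.Str.slice left (some (-(i : Int))) none).toList.length
          = left.toList.length - (left.toList.length - i) := by
        rw [hdrop, List.length_drop]
      have hne : (PySem.Str.len (PySem.Str.slice left (some (-(i : Int))) none) == 0) = false := by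
        rw [PySem.Str.len_eq, hlen2]
        have h3 : left.toList.length - (left.toList.length - i) = i := by omega
        rw [h3]
        simp
        omega
      simp only [hne, Bool.false_eq_true, if_false]
      congr 1
      apply String.toList_inj.mp
      rw [hdrop, String.toList_ofList]

lemma pv_altGo_eq (R : List Char) :
    ∀ (L : List Char), altGo R L = (pvBest L R).map (fun i => L.drop (L.length - i)) := by
  intro L
  induction L with
  | nil => simp [altGo, pvBest]
  | cons c T ih =>
      have hsplit : ∀ k : Nat,
          (List.range' 1 (k + 1)).reverse = (k + 1) :: (List.range' 1 k).reverse := by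
        intro k
        rw [List.range'_concat, List.reverse_append]
        simp
        omega
      have hdropc : ∀ i : Nat, i ≤ T.length →
          (c :: T).drop ((c :: T).length - i) = T.drop (T.length - i) := by
        intro i hi
        have h1 : (c :: T).length - i = (T.length - i) + 1 := by
          simp [List.length_cons]; omega
        rw [h1, List.drop_succ_cons]
      by_cases hr : T.length + 1 ≤ R.length
      · -- the whole of c::T may be a prefix of R: the head tests of A's scan and of B agree
        have hmin : min (c :: T).length R.length = T.length + 1 := by
          simp [List.length_cons]; omega
        have hcond : PySem.Chars.startswith R (c :: T)
            = decide ((c :: T).drop ((c :: T).length - (T.length + 1)) = R.take (T.length + 1)) := by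
          rw [Bool.eq_iff_iff]
          simp only [PySem.Chars.startswith_iff, decide_eq_true_eq]
          rw [List.prefix_iff_eq_take]
          simp
        unfold pvBest
        rw [hmin, hsplit]
        simp only [List.find?_cons]
        cases hd : decide ((c :: T).drop ((c :: T).length - (T.length + 1)) = R.take (T.length + 1)) with
        | true =>
            have hsw : PySem.Chars.startswith R (c :: T) = true := by rw [hcond, hd]
            simp only [altGo, hsw, if_true, Option.map_some]
            simp
        | false =>
            have hsw : PySem.Chars.startswith R (c :: T) = false := by rw [hcond, hd]
            simp only [altGo, hsw, Bool.false_eq_true, if_false]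
            rw [ih]
            unfold pvBest
            have hminT : min T.length R.length = T.length := by omega
            rw [hminT]
            rw [pv_find?_congr ((List.range' 1 T.length).reverse)
              (p := fun i => decide (List.drop ((c :: T).length - i) (c :: T) = List.take i R))
              (q := fun i => decide (T.drop (T.length - i) = R.take i))
              (by
                intro i hi
                rw [List.mem_reverse, List.mem_range'_1] at hi
                simp only [hdropc i (by omega)])]
            cases hf : ((List.range' 1 T.length).reverse).find?
                (fun i => decide (T.drop (T.length - i) = R.take i)) with
            | none => simp
            | some j =>
                have hmem := List.mem_of_find?_eq_some hf
                rw [List.mem_reverse, List.mem_range'_1] at hmem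
                simp only [Option.map_some, Option.some.injEq]
                simp only [hdropc j (by omega)]
      · -- c::T is longer than R: B's head test fails, and A's range top is |R| < |c::T|
        have hsw : PySem.Chars.startswith R (c :: T) = false := by
          cases hsw : PySem.Chars.startswith R (c :: T) with
          | false => rfl
          | true =>
              exfalso
              have h1 := (PySem.Chars.startswith_iff R (c :: T)).mp hsw
              have h2 := h1.length_le
              simp [List.length_cons] at h2
              omega
        have hmin : min (c :: T).length R.length = R.length := by
          simp [List.length_cons]; omega
        have hminT : min T.length R.length = R.length := by omega
        simp only [altGo, hsw, Bool.false_eq_true, if_false]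
        rw [ih]
        unfold pvBest
        rw [hmin, hminT]
        rw [pv_find?_congr ((List.range' 1 R.length).reverse)
          (p := fun i => decide (List.drop ((c :: T).length - i) (c :: T) = List.take i R))
          (q := fun i => decide (T.drop (T.length - i) = R.take i))
          (by
            intro i hi
            rw [List.mem_reverse, List.mem_range'_1] at hi
            simp only [hdropc i (by omega)])]
        cases hf : ((List.range' 1 R.length).reverse).find?
            (fun i => decide (T.drop (T.length - i) = R.take i)) with
        | none => simp
        | some j =>
            have hmem := List.mem_of_find?_eq_some hf
            rw [List.mem_reverse, List.mem_range'_1] at hmem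
            simp only [Option.map_some, Option.some.injEq]
            simp only [hdropc j (by omega)]

-- ===== VERDICT (by name: the statement is the Claim_ definition above) =====
theorem find_largest_suffix_prefix_overlap_spec : Claim_equal_find_largest_suffix_prefix_overlap := by
  intro left right _
  unfold Spec_find_largest_suffix_prefix_overlap find_largest_suffix_prefix_overlap_alt
  rw [pv_A_eq, pv_altGo_eq, Option.map_map]
  rfl
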